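-- pv_equiv track=rewrite | github.com/shokolatca/knowledge-distillation-pytorch | mms_lid/segmentation.py | compute_segment_starts
-- ===== SOURCE A (Python) =====
-- import math
-- from typing import List
--
-- def compute_segment_starts(
--     num_samples: int,
--     window_samples: int,
--     hop_samples: int,
-- ) -> List[int]:
--     """Return segment start offsets that cover an audio clip.
--
--     For very short clips, returns a single start at 0 (the caller can zero-pad).
--     """
--     if num_samples <= 0:
--         return [0]
--
--     if window_samples <= 0 or hop_samples <= 0:
--         raise ValueError("window_samples and hop_samples must be positive")
--
--     if num_samples <= window_samples:
--         return [0]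
--
--     count = 1 + int(math.ceil((num_samples - window_samples) / float(hop_samples)))
--     max_start = num_samples - window_samples
--
--     starts: List[int] = []
--     for index in range(count):
--         start = min(index * hop_samples, max_start)
--         starts.append(start)
--
--     # Guard against accidental duplicates due to min clipping.
--     deduped = []
--     last = None
--     for value in starts:
--         if value != last:
--             deduped.append(value)
--         last = value
--     return deduped
-- ===== SOURCE B (Python) =====
-- def compute_segment_starts(num_samples, window_samples, hop_samples):
--     """Return segment start offsets that cover an audio clip."""
--     if num_samples <= 0:
--         return [0]
--     if window_samples <= 0 or hop_samples <= 0: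
--         raise ValueError("window_samples and hop_samples must be positive")
--     if num_samples <= window_samples:
--         return [0]
--     max_start = num_samples - window_samples
--     return list(range(0, max_start, hop_samples)) + [max_start]
-- ===== Notes on version B (the rewrite author's own statement) =====
-- stated objective: simpler
-- what changed: Replaces the ceil-count loop with per-element min-clipping plus a second consecutive-dedup pass by a single stride range(0, max_start, hop) with max_start appended; no clipping and no dedup pass are needed.
-- outside the precondition, e.g. on compute_segment_starts(5, 0, 2): A raises ValueError, B raises ValueError
import Mathlib
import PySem

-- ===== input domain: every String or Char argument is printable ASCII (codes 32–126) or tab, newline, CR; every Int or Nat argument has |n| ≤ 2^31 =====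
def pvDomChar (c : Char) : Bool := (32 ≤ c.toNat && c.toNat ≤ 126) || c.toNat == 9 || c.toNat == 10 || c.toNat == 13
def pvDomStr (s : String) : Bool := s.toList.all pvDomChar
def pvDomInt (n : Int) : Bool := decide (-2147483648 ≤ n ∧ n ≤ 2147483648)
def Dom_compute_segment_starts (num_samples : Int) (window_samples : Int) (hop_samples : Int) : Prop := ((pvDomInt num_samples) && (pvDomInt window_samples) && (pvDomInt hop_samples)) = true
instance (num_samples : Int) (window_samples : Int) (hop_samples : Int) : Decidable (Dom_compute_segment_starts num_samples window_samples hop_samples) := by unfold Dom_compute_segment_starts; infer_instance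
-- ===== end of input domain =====

-- B replaces A's clip-every-index loop plus consecutive-dedup pass by a single
-- stride range(0, max_start, hop) with max_start appended (objective: simpler).


-- ===== PORT A =====
-- 'int(math.ceil((num-window)/float(hop)))' is ported as exact ceiling division
-- -((-(num-window)) // hop): exact on Dom, where |num-window| ≤ 2^32 and the
-- float quotient can never round across an integer boundary.
def compute_segment_starts (num_samples : Int) (window_samples : Int) (hop_samples : Int) : List Int :=
  if num_samples ≤ 0 then [0]
  else if window_samples ≤ 0 ∨ hop_samples ≤ 0 then []  -- raise ValueError: excluded by Pre_
  else if num_samples ≤ window_samples then [0]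
  else
    let count : Int := 1 + (-(PySem.Int.floordiv (-(num_samples - window_samples)) hop_samples))
    let max_start : Int := num_samples - window_samples
    let starts : List Int :=
      (PySem.List.pyRange 0 count 1).foldl
        (fun acc index => acc ++ [min (index * hop_samples) max_start]) []
    let dedup :=
      starts.foldl
        (fun (st : List Int × Option Int) value =>
          if some value ≠ st.2 then (st.1 ++ [value], some value) else (st.1, some value))
        ([], none)
    dedup.1

-- ===== PORT B =====
def compute_segment_starts_alt (num_samples : Int) (window_samples : Int) (hop_samples : Int) : List Int :=
  if num_samples ≤ 0 then [0]
  else if window_samples ≤ 0 ∨ hop_samples ≤ 0 then []  -- raise ValueError: excluded by Pre_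
  else if num_samples ≤ window_samples then [0]
  else
    let max_start : Int := num_samples - window_samples
    PySem.List.pyRange 0 max_start hop_samples ++ [max_start]

-- ===== PRECONDITION & SPEC =====
-- Pre_ excludes exactly the inputs where A raises ValueError (num_samples > 0
-- with a non-positive window or hop); B raises the same ValueError there.
def Pre_compute_segment_starts (num_samples : Int) (window_samples : Int) (hop_samples : Int) : Prop :=
  num_samples ≤ 0 ∨ (0 < window_samples ∧ 0 < hop_samples)
instance (num_samples : Int) (window_samples : Int) (hop_samples : Int) : Decidable (Pre_compute_segment_starts num_samples window_samples hop_samples) := by unfold Pre_compute_segment_starts; infer_instance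
def pvWitness_compute_segment_starts : Int × Int × Int := (10, 4, 3)

def Spec_compute_segment_starts (num_samples : Int) (window_samples : Int) (hop_samples : Int) (out : List Int) : Prop := out = compute_segment_starts_alt num_samples window_samples hop_samples
instance (num_samples : Int) (window_samples : Int) (hop_samples : Int) (out : List Int) : Decidable (Spec_compute_segment_starts num_samples window_samples hop_samples out) := by unfold Spec_compute_segment_starts; infer_instance

-- ===== CLAIM (what is proved, stated in full; the proofs are below) =====
def Claim_equal_compute_segment_starts : Prop := ∀ (num_samples : Int) (window_samples : Int) (hop_samples : Int), Dom_compute_segment_starts num_samples window_samples hop_samples → Pre_compute_segment_starts num_samples window_samples hop_samples → Spec_compute_segment_starts num_samples window_samples hop_samples (compute_segment_starts num_samples window_samples hop_samples)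

-- ===== LEMMAS AND PROOFS =====

-- A's append loop is a map.
theorem pv_foldl_append_map (f : Int → Int) :
    ∀ (l : List Int) (init : List Int),
      l.foldl (fun acc x => acc ++ [f x]) init = init ++ l.map f := by
  intro l
  induction l with
  | nil => simp
  | cons x xs ih => intro init; simp [List.foldl_cons, ih]

-- The dedup pass is the identity on a list whose adjacent elements differ and
-- whose head differs from the incoming last value.
theorem pv_dedup_id :
    ∀ (l : List Int) (acc : List Int) (lastv : Option Int),
      l.IsChain (· ≠ ·) → (∀ x, l.head? = some x → some x ≠ lastv) →
      (l.foldl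
        (fun (st : List Int × Option Int) value =>
          if some value ≠ st.2 then (st.1 ++ [value], some value) else (st.1, some value))
        (acc, lastv)).1 = acc ++ l := by
  intro l
  induction l with
  | nil => simp
  | cons x xs ih =>
    intro acc lastv hch hhd
    have hx : some x ≠ lastv := hhd x rfl
    have hch' : xs.IsChain (· ≠ ·) := (List.isChain_cons.mp hch).2
    have hhd' : ∀ y, xs.head? = some y → some y ≠ some x := by
      intro y hy
      have hne := (List.isChain_cons.mp hch).1 y (by simp [hy])
      exact fun h => hne (Option.some.inj h).symm
    simp only [List.foldl_cons, if_pos hx]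
    rw [ih (acc ++ [x]) (some x) hch' hhd']
    simp

-- The only real case: num > window > 0, hop > 0.
theorem pv_main (num window hop : Int) (hw : 0 < window) (hh : 0 < hop) (hnw : window < num) :
    compute_segment_starts num window hop = compute_segment_starts_alt num window hop := by
  have h0 : ¬ num ≤ 0 := by omega
  have h1 : ¬ (window ≤ 0 ∨ hop ≤ 0) := by omega
  have h2 : ¬ num ≤ window := by omega
  set a : Int := num - window with hadef
  have ha : 0 < a := by omega
  -- the ceiling count
  set c : Int := (a + hop - 1) / hop with hcdef
  have hmod : 0 ≤ (a + hop - 1) % hop ∧ (a + hop - 1) % hop < hop :=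
    ⟨Int.emod_nonneg _ (by omega), Int.emod_lt_of_pos _ hh⟩
  have hdm := Int.ediv_add_emod (a + hop - 1) hop
  have hdivmod : hop * c + (a + hop - 1) % hop = a + hop - 1 := by
    rw [hcdef]; omega
  have hcu : a ≤ c * hop := by nlinarith [hmod.1, hmod.2]
  have hcl : (c - 1) * hop < a := by nlinarith [hmod.1, hmod.2]
  have hceq : -(PySem.Int.floordiv (-a) hop) = c :=
    (PySem.Int.neg_floordiv_neg_eq_iff_of_pos hh).mpr ⟨hcl, hcu⟩
  have hc0 : 0 < c := by nlinarith [hcl]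
  -- B's stride list
  have hB : PySem.List.pyRange 0 a hop =
      (List.range c.toNat).map (fun k : Nat => (k : Int) * hop) := by
    rw [PySem.List.pyRange_of_pos 0 a hh, if_pos ha]
    simp only [sub_zero]
    rw [← hcdef]
    exact List.map_congr_left (by intro k _; ring)
  -- A's starts list
  have hA : (PySem.List.pyRange 0 (1 + c) 1).foldl
      (fun acc index => acc ++ [min (index * hop) a]) [] =
      (List.range c.toNat).map (fun k : Nat => (k : Int) * hop) ++ [a] := by
    rw [pv_foldl_append_map, List.nil_append, PySem.List.pyRange_one]
    have hn : (1 + c - 0).toNat = c.toNat + 1 := by omega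
    rw [hn, List.range_succ, List.map_append, List.map_append, List.map_map, List.map_map]
    congr 1
    · apply List.map_congr_left
      intro k hk
      have hk' : (k : Int) ≤ c - 1 := by
        have := List.mem_range.mp hk; omega
      have hle : (k : Int) * hop ≤ (c - 1) * hop :=
        mul_le_mul_of_nonneg_right hk' (by omega)
      simp only [Function.comp_apply]
      rw [zero_add, min_eq_left (by omega)]
    · simp only [List.map_cons, List.map_nil, Function.comp_apply]
      have hcc : (c.toNat : Int) = c := by omega
      rw [zero_add, hcc, min_eq_right (by omega)]
  -- the combined list has pairwise-distinct adjacent elements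
  have hpw : ((List.range c.toNat).map (fun k : Nat => (k : Int) * hop) ++ [a]).Pairwise (· < ·) := by
    rw [List.pairwise_append]
    refine ⟨?_, by simp, ?_⟩
    · refine List.Pairwise.map _ ?_ (List.pairwise_lt_range)
      intro i j hij
      have hij' : (i : Int) < (j : Int) := by exact_mod_cast hij
      nlinarith
    · intro x hx y hy
      simp at hy; subst hy
      obtain ⟨k, hk, rfl⟩ := List.mem_map.mp hx
      have hk' : (k : Int) ≤ c - 1 := by
        have := List.mem_range.mp hk; omega
      have : (k : Int) * hop ≤ (c - 1) * hop :=
        mul_le_mul_of_nonneg_right hk' (by omega)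
      omega
  have hch : ((List.range c.toNat).map (fun k : Nat => (k : Int) * hop) ++ [a]).IsChain (· ≠ ·) :=
    (hpw.imp (fun hlt => ne_of_lt hlt)).isChain
  -- assemble
  simp only [compute_segment_starts, compute_segment_starts_alt, if_neg h0, if_neg h1, if_neg h2]
  rw [← hadef]
  rw [hceq, hA, hB]
  exact pv_dedup_id _ [] none hch (by intro x _; simp)

-- ===== VERDICT (by name: the statement is the Claim_ definition above) =====
theorem compute_segment_starts_spec : Claim_equal_compute_segment_starts := by
  intro num window hop _ hpre
  unfold Spec_compute_segment_starts
  rcases hpre with h | ⟨hw, hh⟩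
  · simp [compute_segment_starts, compute_segment_starts_alt, if_pos h]
  · by_cases h2 : num ≤ window
    · have h1 : ¬ (window ≤ 0 ∨ hop ≤ 0) := by omega
      by_cases h0 : num ≤ 0 <;>
        simp [compute_segment_starts, compute_segment_starts_alt, h0, h1, h2]
    · exact pv_main num window hop hw hh (by omega)
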